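-- pv_equiv track=rewrite | github.com/harjassand/AGI-Stack-Unchained | tools/v19_runs/v19_ladder_evidence_pipeline_v1.py | _compute_levels
-- ===== SOURCE A (Python) =====
-- _LEVELS: tuple[tuple[str, str], ...] = (
--     ("L0", "M_SIGMA"),
--     ("L1", "M_SIGMA"),
--     ("L2", "M_PI"),
--     ("L3", "M_D"),
--     ("L4", "M_H"),
--     ("L5", "M_A"),
--     ("L6", "M_K"),
--     ("L7", "M_E"),
--     ("L8", "M_M"),
--     ("L9", "M_C"),
--     ("L10", "M_W"),
--     ("L11", "M_T"),
-- )
--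
-- def _compute_levels(success_events: list[tuple[int, set[str], str]]) -> tuple[list[str], str | None, dict[str, int], int | None]:
--     achieved: list[str] = []
--     level_first: dict[str, int] = {}
--     seen: set[str] = set()
--     for tick_u64, morphism_types, _ in sorted(success_events, key=lambda row: (int(row[0]), str(row[2]))):
--         seen.update(morphism_types)
--         for idx, (level, morphism_type) in enumerate(_LEVELS):
--             if level in level_first:
--                 continue
--             required = {m for _, m in _LEVELS[: idx + 1]}
--             if required.issubset(seen):
--                 level_first[level] = int(tick_u64)
--     for idx, (level, _morphism_type) in enumerate(_LEVELS):
--         if level in level_first: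
--             achieved.append(level)
--     max_level = achieved[-1] if achieved else None
--     max_level_tick = level_first[max_level] if max_level else None
--     return achieved, max_level, level_first, max_level_tick
-- ===== SOURCE B (Python) =====
-- _LEVELS: tuple[tuple[str, str], ...] = (
--     ("L0", "M_SIGMA"),
--     ("L1", "M_SIGMA"),
--     ("L2", "M_PI"),
--     ("L3", "M_D"),
--     ("L4", "M_H"),
--     ("L5", "M_A"),
--     ("L6", "M_K"),
--     ("L7", "M_E"),
--     ("L8", "M_M"),
--     ("L9", "M_C"),
--     ("L10", "M_W"),
--     ("L11", "M_T"),
-- )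
--
--
-- def _first_cover_tick(events, required):
--     """Tick of the first event after which `required` is fully seen, else None."""
--     seen: set[str] = set()
--     for tick_u64, morphism_types, _ in events:
--         seen.update(morphism_types)
--         if required.issubset(seen):
--             return int(tick_u64)
--     return None
--
--
-- def _compute_levels(success_events: list[tuple[int, set[str], str]]) -> tuple[list[str], str | None, dict[str, int], int | None]:
--     events = sorted(success_events, key=lambda row: (int(row[0]), str(row[2])))
--     level_first: dict[str, int] = {}
--     required: set[str] = set()
--     for level, morphism_type in _LEVELS:
--         required.add(morphism_type)
--         tick = _first_cover_tick(events, required)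
--         if tick is None:
--             break
--         level_first[level] = tick
--     achieved = list(level_first.keys())
--     max_level = achieved[-1] if achieved else None
--     max_level_tick = level_first[max_level] if max_level is not None else None
--     return achieved, max_level, level_first, max_level_tick
-- ===== Notes on version B (the rewrite author's own statement) =====
-- stated objective: alternative
-- what changed: Inverts the loops: instead of re-checking all 12 levels (rebuilding each level's prefix morphism set) at every sorted event, B grows one required set per level and finds each level's first covering event with a single early-exit scan, breaking at the first unachieved level.
import Mathlib
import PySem

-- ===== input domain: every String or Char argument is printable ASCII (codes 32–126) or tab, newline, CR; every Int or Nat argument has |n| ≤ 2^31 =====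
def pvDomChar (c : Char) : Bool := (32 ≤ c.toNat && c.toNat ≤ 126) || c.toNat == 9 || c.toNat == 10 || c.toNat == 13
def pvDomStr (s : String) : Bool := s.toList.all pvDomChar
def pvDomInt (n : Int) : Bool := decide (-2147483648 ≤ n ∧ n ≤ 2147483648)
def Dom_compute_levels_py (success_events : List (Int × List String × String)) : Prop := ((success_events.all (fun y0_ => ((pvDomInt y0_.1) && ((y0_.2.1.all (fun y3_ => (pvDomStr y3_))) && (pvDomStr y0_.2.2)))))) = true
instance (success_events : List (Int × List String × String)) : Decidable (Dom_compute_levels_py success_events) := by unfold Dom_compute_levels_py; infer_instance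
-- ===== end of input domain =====

-- B inverts A's loops: one early-exit scan per level over the sorted events instead of
-- re-checking every level with a freshly rebuilt prefix set at every event (objective: alternative).

-- ===== PORT A =====
-- _LEVELS
def pvLevels : List (String × String) :=
  [("L0","M_SIGMA"), ("L1","M_SIGMA"), ("L2","M_PI"), ("L3","M_D"), ("L4","M_H"),
   ("L5","M_A"), ("L6","M_K"), ("L7","M_E"), ("L8","M_M"), ("L9","M_C"),
   ("L10","M_W"), ("L11","M_T")]

-- body of A's inner level loop (one enumerate(_LEVELS) element p)
def levelCheckA (seen : PySem.Set String) (tick : Int) (lf : PySem.Dict String Int)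
    (p : Int × String × String) : PySem.Dict String Int :=
  if lf.contains p.2.1 then lf                             -- 'continue'
  else
    -- required = {m for _, m in _LEVELS[: idx + 1]}
    let required := PySem.Set.ofList
      ((PySem.List.slice pvLevels none (some (p.1 + 1))).map (·.2))
    if PySem.Set.issubset required seen then lf.insert p.2.1 tick else lf

-- one iteration of A's outer event loop (state = (level_first, seen))
def computeStepA (st : PySem.Dict String Int × PySem.Set String)
    (ev : Int × List String × String) : PySem.Dict String Int × PySem.Set String :=
  let seen := PySem.Set.update st.2 ev.2.1                 -- seen.update(morphism_types)
  let lf := (PySem.List.enumerate pvLevels 0).foldl (levelCheckA seen ev.1) st.1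
  (lf, seen)

def compute_levels_py (success_events : List (Int × List String × String)) :
    List String × Option String × (List (String × Int)) × Option Int :=
  let st := (PySem.List.sorted2 success_events (fun r => r.1) (fun r => r.2.2)).foldl
      computeStepA (PySem.Dict.empty, PySem.Set.empty)
  let level_first := st.1
  -- for idx, (level, _) in enumerate(_LEVELS): if level in level_first: achieved.append(level)
  let achieved := (PySem.List.enumerate pvLevels 0).foldl
      (fun acc p => if level_first.contains p.2.1 then acc ++ [p.2.1] else acc) []
  let max_level := achieved.getLast?                       -- achieved[-1] if achieved else None
  -- level_first[max_level] if max_level else None  (level names are non-empty, truthiness = not-None;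
  -- get? returns none exactly where Python would raise KeyError, which never happens here)
  let max_level_tick := match max_level with
    | some lv => level_first.get? lv
    | none => none
  (achieved, max_level, level_first.items, max_level_tick)

-- ===== PORT B =====
-- _first_cover_tick: scan events accumulating seen; return first tick covering `required`
def firstCoverTickGo (required : PySem.Set String) (seen : PySem.Set String) :
    List (Int × List String × String) → Option Int
  | [] => none
  | ev :: rest =>
    let seen' := PySem.Set.update seen ev.2.1
    if PySem.Set.issubset required seen' then some ev.1
    else firstCoverTickGo required seen' rest

def firstCoverTick (events : List (Int × List String × String))
    (required : PySem.Set String) : Option Int :=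
  firstCoverTickGo required PySem.Set.empty events

-- B's level loop with break, growing `required` one morphism per level
def buildLevelsGo (events : List (Int × List String × String)) :
    List (String × String) → PySem.Set String → PySem.Dict String Int → PySem.Dict String Int
  | [], _, lf => lf
  | (lv, m) :: rest, req, lf =>
    match firstCoverTick events (PySem.Set.add req m) with    -- required.add(m); tick = _first_cover_tick(...)
    | none => lf                                              -- break
    | some t => buildLevelsGo events rest (PySem.Set.add req m) (lf.insert lv t)

def compute_levels_py_alt (success_events : List (Int × List String × String)) :
    List String × Option String × (List (String × Int)) × Option Int :=
  let events := PySem.List.sorted2 success_events (fun r => r.1) (fun r => r.2.2)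
  let level_first := buildLevelsGo events pvLevels PySem.Set.empty PySem.Dict.empty
  let achieved := level_first.keys                         -- list(level_first.keys())
  let max_level := achieved.getLast?                       -- achieved[-1] if achieved else None
  let max_level_tick := match max_level with
    | some lv => level_first.get? lv
    | none => none
  (achieved, max_level, level_first.items, max_level_tick)

-- ===== PRECONDITION & SPEC =====
def Spec_compute_levels_py (success_events : List (Int × List String × String)) (out : List String × Option String × (List (String × Int)) × Option Int) : Prop := out = compute_levels_py_alt success_events
instance (success_events : List (Int × List String × String)) (out : List String × Option String × (List (String × Int)) × Option Int) : Decidable (Spec_compute_levels_py success_events out) := by unfold Spec_compute_levels_py; infer_instance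

-- ===== CLAIM (what is proved, stated in full; the proofs are below) =====
def Claim_equal_compute_levels_py : Prop := ∀ (success_events : List (Int × List String × String)), Dom_compute_levels_py success_events → Spec_compute_levels_py success_events (compute_levels_py success_events)


-- ===== LEMMAS AND PROOFS =====

-- A's inner level loop, re-expressed structurally (req accumulates the prefix morphisms)
def innerB (seen : PySem.Set String) (tick : Int) :
    List (String × String) → PySem.Set String → PySem.Dict String Int → PySem.Dict String Int
  | [], _, lf => lf
  | (lv, m) :: rest, req, lf =>
    innerB seen tick rest (PySem.Set.add req m)
      (if lf.contains lv then lf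
       else if PySem.Set.issubset (PySem.Set.add req m) seen then lf.insert lv tick else lf)

def seenUpd (s : PySem.Set String) (ev : Int × List String × String) : PySem.Set String :=
  PySem.Set.update s ev.2.1

theorem ofList_append_singleton (xs : List String) (m : String) :
    PySem.Set.ofList (xs ++ [m]) = PySem.Set.add (PySem.Set.ofList xs) m := by
  simp [PySem.Set.ofList_eq_foldl, List.foldl_append]

-- A's enumerate-fold equals innerB, generalized over the decomposition pvLevels = pre ++ suf
theorem innerA_gen (seen : PySem.Set String) (tick : Int) :
    ∀ (suf pre : List (String × String)) (lf : PySem.Dict String Int),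
      pvLevels = pre ++ suf →
      (PySem.List.enumerate suf (pre.length : Int)).foldl (levelCheckA seen tick) lf
      = innerB seen tick suf (PySem.Set.ofList (pre.map (·.2))) lf := by
  intro suf
  induction suf with
  | nil => intro pre lf _; simp [PySem.List.enumerate_nil, innerB]
  | cons hd tl ih =>
    intro pre lf hsplit
    obtain ⟨lv, m⟩ := hd
    rw [PySem.List.enumerate_cons, List.foldl_cons]
    have hreq : PySem.Set.ofList
        ((PySem.List.slice pvLevels none (some ((pre.length : Int) + 1))).map (·.2))
        = PySem.Set.add (PySem.Set.ofList (pre.map (·.2))) m := by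
      have hc : ((pre.length : Int) + 1) = ((pre.length + 1 : Nat) : Int) := by push_cast; ring
      rw [hc, PySem.List.slice_to_natCast, hsplit]
      have htake : (pre ++ (lv, m) :: tl).take (pre.length + 1) = pre ++ [(lv, m)] := by
        have h0 : pre ++ (lv, m) :: tl = (pre ++ [(lv, m)]) ++ tl := by simp
        have hlen : (pre ++ [(lv, m)]).length = pre.length + 1 := by simp
        rw [h0, ← hlen, List.take_left]
      rw [htake]
      simp only [List.map_append, List.map_cons, List.map_nil]
      exact ofList_append_singleton _ m
    have hstep : levelCheckA seen tick lf ((pre.length : Int), (lv, m))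
        = (if lf.contains lv then lf
           else if PySem.Set.issubset (PySem.Set.add (PySem.Set.ofList (pre.map (·.2))) m) seen
             then lf.insert lv tick else lf) := by
      simp only [levelCheckA]
      rw [hreq]
    have hsplit2 : pvLevels = (pre ++ [(lv, m)]) ++ tl := by simp [hsplit]
    have hIH := ih (pre ++ [(lv, m)])
      (if lf.contains lv then lf
       else if PySem.Set.issubset (PySem.Set.add (PySem.Set.ofList (pre.map (·.2))) m) seen
         then lf.insert lv tick else lf) hsplit2
    simp only [List.map_append, List.map_cons, List.map_nil, ofList_append_singleton] at hIH
    rw [innerB, hstep]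
    have hlen2 : ((pre.length : Int) + 1) = (((pre ++ [(lv, m)]).length : Nat) : Int) := by
      simp
    rw [hlen2]
    exact hIH

theorem mem_add_of_mem (s : PySem.Set String) (m x : String) (h : x ∈ s) :
    x ∈ PySem.Set.add s m := by
  rw [PySem.Set.mem_add]; exact Or.inl h

theorem not_issubset_add (req s : PySem.Set String) (m : String)
    (h : PySem.Set.issubset req s = false) :
    PySem.Set.issubset (PySem.Set.add req m) s = false := by
  cases hh : PySem.Set.issubset (PySem.Set.add req m) s with
  | false => rfl
  | true =>
    exfalso
    rw [PySem.Set.issubset_iff] at hh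
    have hs : PySem.Set.issubset req s = true := by
      rw [PySem.Set.issubset_iff]
      intro x hx
      exact hh x (mem_add_of_mem req m x hx)
    rw [hs] at h
    exact absurd h (by decide)

-- firstCoverTickGo on an appended event
theorem fct_go_append (R : PySem.Set String) (e : Int × List String × String) :
    ∀ (es : List (Int × List String × String)) (s : PySem.Set String),
      firstCoverTickGo R s (es ++ [e])
      = match firstCoverTickGo R s es with
        | some t => some t
        | none =>
          if PySem.Set.issubset R (PySem.Set.update (es.foldl seenUpd s) e.2.1)
          then some e.1 else none := by
  intro es
  induction es with
  | nil =>
    intro s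
    rw [List.nil_append, List.foldl_nil, firstCoverTickGo, firstCoverTickGo]
    split <;> rfl
  | cons hd tl ih =>
    intro s
    rw [List.cons_append, firstCoverTickGo, firstCoverTickGo]
    cases hs : PySem.Set.issubset R (PySem.Set.update s hd.2.1) with
    | true => simp only [reduceIte]
    | false =>
      simp only [Bool.false_eq_true, if_false]
      rw [ih, List.foldl_cons]
      rfl

-- a failed cover stays failed when the required set grows
theorem fct_go_none_add (R : PySem.Set String) (m : String) :
    ∀ (es : List (Int × List String × String)) (s : PySem.Set String),
      firstCoverTickGo R s es = none →
      firstCoverTickGo (PySem.Set.add R m) s es = none := by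
  intro es
  induction es with
  | nil => intro s _; rfl
  | cons hd tl ih =>
    intro s h
    rw [firstCoverTickGo] at h ⊢
    cases hs : PySem.Set.issubset R (PySem.Set.update s hd.2.1) with
    | true => rw [if_pos hs] at h; simp at h
    | false =>
      rw [if_neg (by rw [hs]; decide)] at h
      rw [not_issubset_add _ _ _ hs]
      simp only [Bool.false_eq_true, if_false]
      exact ih _ h

theorem build_of_none (es : List (Int × List String × String)) :
    ∀ (rest : List (String × String)) (req : PySem.Set String) (lf : PySem.Dict String Int),
      firstCoverTick es req = none → buildLevelsGo es rest req lf = lf := by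
  intro rest
  induction rest with
  | nil => intro req lf _; rfl
  | cons hd tl _ =>
    intro req lf h
    obtain ⟨lv, m⟩ := hd
    have h' : firstCoverTick es (PySem.Set.add req m) = none :=
      fct_go_none_add req m es PySem.Set.empty h
    rw [buildLevelsGo, h']

theorem innerB_none (seen : PySem.Set String) (tick : Int) :
    ∀ (rest : List (String × String)) (req : PySem.Set String) (lf : PySem.Dict String Int),
      PySem.Set.issubset req seen = false → innerB seen tick rest req lf = lf := by
  intro rest
  induction rest with
  | nil => intro req lf _; rfl
  | cons hd tl ih =>
    intro req lf h
    obtain ⟨lv, m⟩ := hd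
    have h' := not_issubset_add req seen m h
    have harg : (if lf.contains lv = true then lf
        else if PySem.Set.issubset (PySem.Set.add req m) seen = true
          then lf.insert lv tick else lf) = lf := by
      rw [h']
      simp only [Bool.false_eq_true, if_false]
      split <;> rfl
    rw [innerB, harg]
    exact ih _ _ h'

theorem build_contains_mono (es : List (Int × List String × String)) :
    ∀ (rest : List (String × String)) (req : PySem.Set String) (lf : PySem.Dict String Int)
      (k : String), lf.contains k = true → (buildLevelsGo es rest req lf).contains k = true := by
  intro rest
  induction rest with
  | nil => intro req lf k h; exact h
  | cons hd tl ih =>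
    intro req lf k h
    obtain ⟨lv, m⟩ := hd
    rw [buildLevelsGo]
    cases hf : firstCoverTick es (PySem.Set.add req m) with
    | none => exact h
    | some t => exact ih _ _ _ (by rw [PySem.Dict.contains_insert, h]; simp)

-- the crux: folding one more event into A's state = B's build over the longer event list
theorem step_lemma (es : List (Int × List String × String)) (e : Int × List String × String) :
    ∀ (rest : List (String × String)) (req : PySem.Set String) (lf : PySem.Dict String Int),
      (∀ lv ∈ rest.map Prod.fst, lf.contains lv = false) →
      (rest.map Prod.fst).Nodup →
      innerB (PySem.Set.update (es.foldl seenUpd PySem.Set.empty) e.2.1) e.1 rest req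
        (buildLevelsGo es rest req lf)
      = buildLevelsGo (es ++ [e]) rest req lf := by
  intro rest
  induction rest with
  | nil => intro req lf _ _; rfl
  | cons hd tl ih =>
    intro req lf hfresh hnd
    obtain ⟨lv, m⟩ := hd
    have hfresh_lv : lf.contains lv = false := hfresh lv (by simp)
    have hnd_tl : (tl.map Prod.fst).Nodup := (List.nodup_cons.mp (by simpa using hnd)).2
    have hlv_not_tl : lv ∉ tl.map Prod.fst := (List.nodup_cons.mp (by simpa using hnd)).1
    have hfresh' : ∀ (t : Int), ∀ lv' ∈ tl.map Prod.fst, (lf.insert lv t).contains lv' = false := by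
      intro t lv' hlv'
      rw [PySem.Dict.contains_insert]
      have h1 : lf.contains lv' = false := hfresh lv' (by simp [hlv'])
      have h2 : lv' ≠ lv := fun hEq => hlv_not_tl (hEq ▸ hlv')
      simp [h1, h2]
    have happ := fct_go_append (PySem.Set.add req m) e es PySem.Set.empty
    rw [buildLevelsGo, buildLevelsGo, innerB]
    cases hf : firstCoverTick es (PySem.Set.add req m) with
    | some t =>
      have happ' : firstCoverTick (es ++ [e]) (PySem.Set.add req m) = some t := by
        rw [firstCoverTick, happ]
        rw [firstCoverTick] at hf
        rw [hf]
      rw [happ']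
      have hcont : (buildLevelsGo es tl (PySem.Set.add req m) (lf.insert lv t)).contains lv = true :=
        build_contains_mono es tl _ _ lv (by rw [PySem.Dict.contains_insert]; simp)
      rw [if_pos hcont]
      exact ih (PySem.Set.add req m) (lf.insert lv t) (hfresh' t) hnd_tl
    | none =>
      have happ' : firstCoverTick (es ++ [e]) (PySem.Set.add req m)
          = if PySem.Set.issubset (PySem.Set.add req m)
              (PySem.Set.update (es.foldl seenUpd PySem.Set.empty) e.2.1)
            then some e.1 else none := by
        rw [firstCoverTick, happ]
        rw [firstCoverTick] at hf
        rw [hf]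
      rw [happ', hfresh_lv]
      simp only [Bool.false_eq_true, if_false]
      cases hsub : PySem.Set.issubset (PySem.Set.add req m)
          (PySem.Set.update (es.foldl seenUpd PySem.Set.empty) e.2.1) with
      | true =>
        simp only [reduceIte]
        have hIH := ih (PySem.Set.add req m) (lf.insert lv e.1) (hfresh' e.1) hnd_tl
        rw [build_of_none es tl (PySem.Set.add req m) (lf.insert lv e.1) hf] at hIH
        exact hIH
      | false =>
        simp only [Bool.false_eq_true, if_false]
        exact innerB_none _ _ tl (PySem.Set.add req m) lf hsub

set_option maxHeartbeats 1600000 in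
theorem pvLevels_names_nodup : (pvLevels.map Prod.fst).Nodup := by decide

theorem build_events_nil :
    ∀ (rest : List (String × String)) (req : PySem.Set String) (lf : PySem.Dict String Int),
      buildLevelsGo [] rest req lf = lf := by
  intro rest req lf
  cases rest with
  | nil => rfl
  | cons hd tl => obtain ⟨lv, m⟩ := hd; rfl

set_option maxHeartbeats 1600000 in
theorem stepA_eq (st : PySem.Dict String Int × PySem.Set String)
    (e : Int × List String × String) :
    computeStepA st e =
      (innerB (PySem.Set.update st.2 e.2.1) e.1 pvLevels PySem.Set.empty st.1,
       PySem.Set.update st.2 e.2.1) := by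
  have h := innerA_gen (PySem.Set.update st.2 e.2.1) e.1 pvLevels [] st.1 rfl
  simp only [List.length_nil, Nat.cast_zero, List.map_nil] at h
  rw [computeStepA, h]
  rfl

theorem fold_lemma :
    ∀ (es : List (Int × List String × String)),
      es.foldl computeStepA (PySem.Dict.empty, PySem.Set.empty)
      = (buildLevelsGo es pvLevels PySem.Set.empty PySem.Dict.empty,
         es.foldl seenUpd PySem.Set.empty) := by
  intro es
  induction es using List.reverseRecOn with
  | nil => rw [List.foldl_nil, List.foldl_nil, build_events_nil]
  | append_singleton es e ih =>
    rw [List.foldl_append, List.foldl_append, ih]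
    simp only [List.foldl_cons, List.foldl_nil]
    rw [stepA_eq]
    dsimp only
    rw [step_lemma es e pvLevels PySem.Set.empty PySem.Dict.empty
        (fun lv _ => PySem.Dict.contains_empty lv) pvLevels_names_nodup]
    rfl

-- the achieved loop appends exactly the level names the dict contains, in order
theorem ach_gen (d : PySem.Dict String Int) :
    ∀ (L : List (String × String)) (s : Int) (acc : List String),
      (PySem.List.enumerate L s).foldl
        (fun acc p => if d.contains p.2.1 then acc ++ [p.2.1] else acc) acc
      = acc ++ (L.map Prod.fst).filter (fun k => d.contains k) := by
  intro L
  induction L with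
  | nil => intro s acc; simp [PySem.List.enumerate_nil]
  | cons hd tl ih =>
    intro s acc
    rw [PySem.List.enumerate_cons, List.foldl_cons, List.map_cons, List.filter_cons]
    cases h : d.contains hd.1 with
    | true =>
      simp only [reduceIte]
      rw [ih]
      simp
    | false =>
      simp only [Bool.false_eq_true, if_false]
      exact ih _ _

-- keys of the built dict form a prefix of the level names
theorem build_keys (es : List (Int × List String × String)) :
    ∀ (rest : List (String × String)) (req : PySem.Set String) (lf : PySem.Dict String Int),
      (∀ lv ∈ rest.map Prod.fst, lf.contains lv = false) →
      (rest.map Prod.fst).Nodup →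
      ∃ n, (buildLevelsGo es rest req lf).keys = lf.keys ++ (rest.map Prod.fst).take n := by
  intro rest
  induction rest with
  | nil => intro req lf _ _; exact ⟨0, by simp [buildLevelsGo]⟩
  | cons hd tl ih =>
    intro req lf hfresh hnd
    obtain ⟨lv, m⟩ := hd
    have hfresh_lv : lf.contains lv = false := hfresh lv (by simp)
    have hnd_tl : (tl.map Prod.fst).Nodup := (List.nodup_cons.mp (by simpa using hnd)).2
    have hlv_not_tl : lv ∉ tl.map Prod.fst := (List.nodup_cons.mp (by simpa using hnd)).1
    rw [buildLevelsGo]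
    cases hf : firstCoverTick es (PySem.Set.add req m) with
    | none => exact ⟨0, by simp⟩
    | some t =>
      obtain ⟨n, hn⟩ := ih (PySem.Set.add req m) (lf.insert lv t)
        (fun lv' hlv' => by
          rw [PySem.Dict.contains_insert]
          have h1 : lf.contains lv' = false := hfresh lv' (by simp [hlv'])
          have h2 : lv' ≠ lv := fun hEq => hlv_not_tl (hEq ▸ hlv')
          simp [h1, h2])
        hnd_tl
      refine ⟨n + 1, ?_⟩
      rw [hn, PySem.Dict.keys_insert_of_not_contains _ _ hfresh_lv]
      simp

-- a Nodup list filtered by membership in a decomposition's left part is that part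
theorem filter_mem_left (T D : List String) (hnd : (T ++ D).Nodup) :
    (T ++ D).filter (fun k => decide (k ∈ T)) = T := by
  rw [List.filter_append]
  have h1 : T.filter (fun k => decide (k ∈ T)) = T :=
    List.filter_eq_self.mpr (fun a ha => by simpa using ha)
  have hdisj := (List.nodup_append.mp hnd).2.2
  have h2 : D.filter (fun k => decide (k ∈ T)) = [] :=
    List.filter_eq_nil_iff.mpr (fun a ha => by
      simp only [decide_eq_true_eq]
      intro hT
      exact hdisj a hT a ha rfl)
  rw [h1, h2, List.append_nil]

theorem filter_mem_take (M : List String) (n : Nat) (hnd : M.Nodup) :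
    M.filter (fun k => decide (k ∈ M.take n)) = M.take n := by
  have h := filter_mem_left (M.take n) (M.drop n) (by rwa [List.take_append_drop])
  rwa [List.take_append_drop] at h

-- ===== VERDICT (by name: the statement is the Claim_ definition above) =====
theorem compute_levels_py_spec : Claim_equal_compute_levels_py := by
  intro success_events _
  unfold Spec_compute_levels_py compute_levels_py compute_levels_py_alt
  dsimp only
  rw [fold_lemma]
  dsimp only
  obtain ⟨n, hkeys⟩ := build_keys
    (PySem.List.sorted2 success_events (fun r => r.1) (fun r => r.2.2))
    pvLevels PySem.Set.empty PySem.Dict.empty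
    (fun lv _ => PySem.Dict.contains_empty lv) pvLevels_names_nodup
  rw [PySem.Dict.keys_empty, List.nil_append] at hkeys
  have hach := ach_gen
    (buildLevelsGo (PySem.List.sorted2 success_events (fun r => r.1) (fun r => r.2.2))
      pvLevels PySem.Set.empty PySem.Dict.empty)
    pvLevels 0 []
  rw [hach, List.nil_append]
  have hcongr : (pvLevels.map Prod.fst).filter
      (fun k => (buildLevelsGo (PySem.List.sorted2 success_events (fun r => r.1) (fun r => r.2.2))
        pvLevels PySem.Set.empty PySem.Dict.empty).contains k)
      = (pvLevels.map Prod.fst).filter (fun k => decide (k ∈ (pvLevels.map Prod.fst).take n)) := by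
    apply List.filter_congr
    intro k _
    rw [PySem.Dict.contains_eq_decide_mem_keys, hkeys]
  rw [hcongr, filter_mem_take _ _ pvLevels_names_nodup, ← hkeys]
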